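-- pv_equiv track=rewrite | github.com/alexoliveiraFGV24/paa-lista2 | A1/Exercicios/solucoes.py | q5_2022
-- ===== SOURCE A (Python) =====
-- def q5_2022(A, B):
--     A.sort()
--     C = A.copy()
--     hash = {}
--
--     for num in A:
--         if num in hash:
--             hash[num] += 1
--         else:
--             hash[num] = 1
--
--
--     return hash
-- ===== SOURCE B (Python) =====
-- def q5_2022(A, B):
--     # Same task: sort A in place, return {value: multiplicity}.
--     # Re-implementation: single run-length pass over the sorted list,
--     # no hash-membership test per element.
--     A.sort()
--     res = {}
--     if not A:
--         return res
--     cur = A[0]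
--     cnt = 1
--     for x in A[1:]:
--         if x == cur:
--             cnt += 1
--         else:
--             res[cur] = cnt
--             cur = x
--             cnt = 1
--     res[cur] = cnt
--     return res
-- ===== Notes on version B (the rewrite author's own statement) =====
-- stated objective: simpler
-- what changed: Replaces the per-element dict-membership counting loop with a single run-length pass over the sorted list (track current value and run count, emit a pair at each run boundary); the unused copy is dropped.
import Mathlib
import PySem

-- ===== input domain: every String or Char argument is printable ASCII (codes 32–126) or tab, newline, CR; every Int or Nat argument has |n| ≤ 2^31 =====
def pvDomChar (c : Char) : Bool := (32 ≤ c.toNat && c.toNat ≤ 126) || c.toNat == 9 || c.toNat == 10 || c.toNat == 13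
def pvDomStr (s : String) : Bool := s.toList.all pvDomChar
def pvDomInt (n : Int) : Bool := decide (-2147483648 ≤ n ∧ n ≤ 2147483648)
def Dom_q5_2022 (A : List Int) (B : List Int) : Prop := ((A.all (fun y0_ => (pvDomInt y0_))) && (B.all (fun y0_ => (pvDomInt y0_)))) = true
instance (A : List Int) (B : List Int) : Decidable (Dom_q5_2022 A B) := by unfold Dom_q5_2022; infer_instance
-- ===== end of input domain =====

-- B builds the frequency dict by one run-length pass over the sorted list instead of a
-- per-element dict-membership counting loop (objective: simpler). Note: A sorts its first
-- argument in place (B does too); the equivalence proved here is about the return value.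

-- ===== PORT A =====
-- A.sort(); C = A.copy() (unused); for num in A: if num in hash: hash[num]+=1 else hash[num]=1; return hash
def q5_2022 (A : List Int) (B : List Int) : List (Int × Int) :=
  let As := PySem.List.sorted A (fun x => x)
  let _C := As
  (As.foldl
    (fun h num =>
      if h.contains num then h.insert num (h.getD num 0 + 1) else h.insert num 1)
    PySem.Dict.empty).items

-- ===== PORT B =====
-- the run-length loop: cur = current value, cnt = its running count; emits (cur, cnt) at run boundaries
def pvRle (cur : Int) (cnt : Int) : List Int → List (Int × Int)
  | [] => [(cur, cnt)]
  | x :: xs => if x = cur then pvRle cur (cnt + 1) xs else (cur, cnt) :: pvRle x 1 xs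

def q5_2022_alt (A : List Int) (B : List Int) : List (Int × Int) :=
  match PySem.List.sorted A (fun x => x) with
  | [] => []
  | x :: xs => pvRle x 1 xs

-- ===== PRECONDITION & SPEC =====
def Spec_q5_2022 (A : List Int) (B : List Int) (out : List (Int × Int)) : Prop := out = q5_2022_alt A B
instance (A : List Int) (B : List Int) (out : List (Int × Int)) : Decidable (Spec_q5_2022 A B out) := by unfold Spec_q5_2022; infer_instance

-- ===== CLAIM (what is proved, stated in full; the proofs are below) =====
def Claim_equal_q5_2022 : Prop := ∀ (A : List Int) (B : List Int), Dom_q5_2022 A B → Spec_q5_2022 A B (q5_2022 A B)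

-- ===== LEMMAS AND PROOFS =====

-- A's counting loop is Counter(As): the "not in hash" branch inserts getD+1 as well, since getD is 0 there
lemma pvFoldA_eq_counter (s : List Int) :
    s.foldl
      (fun h num =>
        if h.contains num then h.insert num (h.getD num 0 + 1) else h.insert num 1)
      PySem.Dict.empty = PySem.Dict.counter s := by
  rw [← PySem.Dict.foldl_insert_getD_add_one_eq_counter]
  congr 1
  funext h num
  by_cases hc : h.contains num
  · simp [hc]
  · rw [if_neg (by simp [hc]), PySem.Dict.getD_of_not_contains h 0 (by simpa using hc)]
    norm_num

-- unfolding Counter's items over a cons of its sorted input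
lemma grouped_cons (x : Int) (xs : List Int) :
    (PySem.Set.ofList (x :: xs)).map (fun k => (k, (List.count k (x :: xs) : Int))) =
      (x, 1 + (List.count x xs : Int)) ::
        ((PySem.Set.ofList xs).discard x).map (fun k => (k, (List.count k xs : Int))) := by
  rw [PySem.Set.ofList_cons]
  simp only [List.map_cons, List.count_cons_self]
  rw [List.cons_eq_cons]
  refine ⟨by simp [Prod.ext_iff]; ring, ?_⟩
  · apply List.map_congr_left
    intro k hk
    have hne : k ≠ x := ((PySem.Set.mem_discard _ _ _).1 hk).2
    simp [List.count_cons]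
    exact fun h => hne h.symm

-- run-length over a sorted tail whose elements all dominate cur computes Counter's items
lemma pvRle_spec (cur cnt : Int) (s : List Int)
    (hs : s.Pairwise (· ≤ ·)) (hall : ∀ y ∈ s, cur ≤ y) :
    pvRle cur cnt s =
      (cur, cnt + (List.count cur s : Int)) ::
        ((PySem.Set.ofList s).discard cur).map (fun k => (k, (List.count k s : Int))) := by
  induction s generalizing cur cnt with
  | nil => simp [pvRle, PySem.Set.discard]
  | cons x xs ih =>
    rcases List.pairwise_cons.1 hs with ⟨hx, hxs⟩
    by_cases hxc : x = cur
    · subst hxc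
      rw [pvRle, if_pos rfl, ih x (cnt + 1) hxs hx]
      simp only [List.count_cons_self, PySem.Set.ofList_cons]
      rw [List.cons_eq_cons]
      refine ⟨by simp [Prod.ext_iff]; ring, ?_⟩
      have hdd : (PySem.Set.discard (x :: (PySem.Set.ofList xs).discard x) x)
          = (PySem.Set.ofList xs).discard x := by
        simp [PySem.Set.discard, List.filter_filter]
      rw [hdd]
      symm
      apply List.map_congr_left
      intro k hk
      have hne : k ≠ x := ((PySem.Set.mem_discard _ _ _).1 hk).2
      simp [List.count_cons]
      exact fun h => hne h.symm
    · have hlt : cur < x := lt_of_le_of_ne (hall x (List.mem_cons_self)) (fun h => hxc h.symm)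
      have hnm : cur ∉ x :: xs := by
        intro hmem
        rcases List.mem_cons.1 hmem with h | h
        · exact absurd h.symm (ne_of_gt hlt)
        · exact absurd (hx cur h) (not_le.2 hlt)
      rw [pvRle, if_neg hxc, ih x 1 hxs hx]
      have hcnt : List.count cur (x :: xs) = 0 := List.count_eq_zero.2 hnm
      have hdisc : ((PySem.Set.ofList (x :: xs)).discard cur) = PySem.Set.ofList (x :: xs) := by
        apply List.filter_eq_self.2
        intro k hk
        have hmem : k ∈ x :: xs := (PySem.Set.mem_ofList _ _).1 hk
        have : k ≠ cur := fun h => hnm (h ▸ hmem)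
        simp at hk ⊢
        exact this
      rw [hcnt, hdisc, grouped_cons]
      simp
-- ===== VERDICT (by name: the statement is the Claim_ definition above) =====
theorem q5_2022_spec : Claim_equal_q5_2022 := by
  intro A B _
  unfold Spec_q5_2022 q5_2022 q5_2022_alt
  simp only
  rw [pvFoldA_eq_counter, PySem.Dict.items_counter]
  cases hs : PySem.List.sorted A (fun x => x) with
  | nil => simp
  | cons x xs =>
    have hp : (x :: xs).Pairwise (fun a b => a ≤ b) := by
      rw [← hs]; exact PySem.List.sorted_pairwise A (fun x => x)
    rcases List.pairwise_cons.1 hp with ⟨hx, hxs⟩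
    rw [grouped_cons]
    exact (pvRle_spec x 1 xs hxs hx).symm
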